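-- pv_equiv track=rewrite | github.com/greatjourney/Geier | new_method_geier_3.py | get_default_util
-- ===== SOURCE A (Python) =====
-- def get_default_util(players):
--     default_util = [0 for _ in range(players)]
--     if players % 2 == 0:
--         half = int(players / 2)
--         for i in range(half):
--             default_util[i] = (half) - i
--         for i in range(half, players):
--             default_util[i] = (half) - i - 1
--     else:
--         half = int((players - 1) / 2)
--         for i in range(half):
--             default_util[i] = (half) - i
--         for i in range(half + 1, players):
--             default_util[i] = (half) - i
--     return default_util
-- ===== SOURCE B (Python) =====
-- def get_default_util(players):
--     # The utility vector is antisymmetric: util[i] == -util[players-1-i], with the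
--     # middle slot of an odd-length vector equal to 0.  So fill the array with one
--     # mirrored-write loop over the first half instead of two parity-specific passes.
--     half = players // 2
--     util = [0] * players
--     for j in range(half):
--         v = half - j
--         util[j] = v
--         util[players - 1 - j] = -v
--     return util
-- ===== Notes on version B (the rewrite author's own statement) =====
-- stated objective: simpler
-- what changed: B exploits the antisymmetry util[i] == -util[players-1-i] of the utility vector: one mirrored-write loop over the first half of the array (leaving the middle slot 0 for odd counts) replaces A's parity case split with two full-range assignment passes per branch.
import Mathlib
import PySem

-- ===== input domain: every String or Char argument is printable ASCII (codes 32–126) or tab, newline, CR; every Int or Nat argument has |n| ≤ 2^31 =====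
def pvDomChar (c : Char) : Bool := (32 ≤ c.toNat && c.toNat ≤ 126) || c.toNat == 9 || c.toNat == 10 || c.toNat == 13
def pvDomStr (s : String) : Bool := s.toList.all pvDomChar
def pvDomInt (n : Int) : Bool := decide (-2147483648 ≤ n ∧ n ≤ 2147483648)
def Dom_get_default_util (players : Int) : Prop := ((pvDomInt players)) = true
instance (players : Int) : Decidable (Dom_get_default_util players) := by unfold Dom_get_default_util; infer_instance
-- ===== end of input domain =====

-- B fills the array with one mirrored-write loop over the first half (antisymmetry
-- util[i] = -util[players-1-i]) instead of A's parity split with two passes per branch.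

-- ===== PORT A =====
-- int(players / 2) is float division truncated toward zero: PySem.Int.truncdiv
-- (exact for |players| ≤ 2^31).  default_util[i] = v is List.set; every assigned
-- index comes from a range with 0 ≤ i < players, so i.toNat is Python's index and
-- the write is in bounds (no IndexError); A is total.
def get_default_util (players : Int) : List Int :=
  let default_util := (PySem.List.pyRange 0 players 1).map (fun _ => (0 : Int))
  if PySem.Int.mod players 2 = 0 then
    let half := PySem.Int.truncdiv players 2
    let du1 := (PySem.List.pyRange 0 half 1).foldl
      (fun du i => du.set i.toNat (half - i)) default_util
    (PySem.List.pyRange half players 1).foldl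
      (fun du i => du.set i.toNat (half - i - 1)) du1
  else
    let half := PySem.Int.truncdiv (players - 1) 2
    let du1 := (PySem.List.pyRange 0 half 1).foldl
      (fun du i => du.set i.toNat (half - i)) default_util
    (PySem.List.pyRange (half + 1) players 1).foldl
      (fun du i => du.set i.toNat (half - i)) du1

-- ===== PORT B =====
-- [0] * players is List.replicate players.toNat 0 (empty for players ≤ 0, as in Python);
-- the two writes of each iteration are the two List.set's of the fold step.
def get_default_util_alt (players : Int) : List Int :=
  let half := PySem.Int.floordiv players 2
  let util := List.replicate players.toNat (0 : Int)
  (PySem.List.pyRange 0 half 1).foldl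
    (fun u j => (u.set j.toNat (half - j)).set (players - 1 - j).toNat (-(half - j))) util

-- ===== PRECONDITION & SPEC =====
def Spec_get_default_util (players : Int) (out : List Int) : Prop := out = get_default_util_alt players
instance (players : Int) (out : List Int) : Decidable (Spec_get_default_util players out) := by unfold Spec_get_default_util; infer_instance

-- ===== CLAIM (what is proved, stated in full; the proofs are below) =====
def Claim_equal_get_default_util : Prop := ∀ (players : Int), Dom_get_default_util players → Spec_get_default_util players (get_default_util players)

-- ===== LEMMAS AND PROOFS =====

theorem pvTruncdivTwoOfEven (n : Int) (h : 2 ∣ n) :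
    PySem.Int.truncdiv n 2 = PySem.Int.floordiv n 2 := by
  obtain ⟨k, rfl⟩ := h
  show (2 * k).tdiv 2 = (2 * k).fdiv 2
  rw [Int.mul_tdiv_cancel_left _ (by norm_num), Int.mul_fdiv_cancel_left _ (by norm_num)]

theorem pvFoldLen (g : List Int → Int → List Int)
    (hg : ∀ du i, (g du i).length = du.length) :
    ∀ (l : List Int) (du : List Int), (l.foldl g du).length = du.length := by
  intro l
  induction l with
  | nil => intro du; rfl
  | cons x xs ih => intro du; rw [List.foldl_cons, ih, hg]

-- one-set fold (A's passes)
theorem pvFoldlSetGet (f : Int → Int) (b : Int) :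
    ∀ (m : Nat) (a : Int), 0 ≤ a → (b - a).toNat = m →
    ∀ (du : List Int) (k : Nat),
    ((PySem.List.pyRange a b 1).foldl (fun d i => d.set i.toNat (f i)) du)[k]? =
      if a ≤ (k : Int) ∧ (k : Int) < b ∧ k < du.length then some (f k) else du[k]? := by
  intro m
  induction m with
  | zero =>
    intro a ha hm du k
    rw [PySem.List.pyRange_one_eq_nil (by omega)]
    rw [if_neg (by omega)]
    rfl
  | succ m ih =>
    intro a ha hm du k
    rw [PySem.List.pyRange_one_cons (by omega), List.foldl_cons,
        ih (a + 1) (by omega) (by omega), List.length_set]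
    by_cases hk : k = a.toNat
    · subst hk
      rw [if_neg (by omega)]
      by_cases hlen : a.toNat < du.length
      · rw [if_pos (by refine ⟨by omega, by omega, hlen⟩)]
        rw [List.getElem?_set_self (by simpa using hlen)]
        have : ((a.toNat : Int)) = a := by omega
        rw [this]
      · rw [if_neg (by omega)]
        rw [List.set_eq_of_length_le (by omega)]
    · have hks : (du.set a.toNat (f a))[k]? = du[k]? := List.getElem?_set_ne (by omega)
      rw [hks]
      by_cases hc : a ≤ (k : Int) ∧ (k : Int) < b ∧ k < du.length
      · rw [if_pos (by omega), if_pos hc]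
      · rw [if_neg (by omega), if_neg hc]

-- two-set (mirrored) fold (B's single pass); 2 * half ≤ players keeps the mirror
-- index players-1-j in the upper half, disjoint from the lower indices j.
theorem pvFoldMirrorGet (half players : Int) (hp : 2 * half ≤ players) :
    ∀ (m : Nat) (a : Int), 0 ≤ a → (half - a).toNat = m →
    ∀ (du : List Int) (k : Nat),
    ((PySem.List.pyRange a half 1).foldl
        (fun u j => (u.set j.toNat (half - j)).set (players - 1 - j).toNat (-(half - j))) du)[k]? =
      if a ≤ (k : Int) ∧ (k : Int) < half ∧ k < du.length then some (half - k)
      else if a ≤ players - 1 - (k : Int) ∧ players - 1 - (k : Int) < half ∧ k < du.length then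
        some (-(half - (players - 1 - (k : Int))))
      else du[k]? := by
  intro m
  induction m with
  | zero =>
    intro a ha hm du k
    rw [PySem.List.pyRange_one_eq_nil (by omega)]
    rw [if_neg (by omega), if_neg (by omega)]
    rfl
  | succ m ih =>
    intro a ha hm du k
    have hmir : a < players - 1 - a := by omega
    rw [PySem.List.pyRange_one_cons (by omega), List.foldl_cons,
        ih (a + 1) (by omega) (by omega), List.length_set, List.length_set]
    by_cases hlen : k < du.length
    case neg =>
      rw [if_neg (by omega), if_neg (by omega), if_neg (by omega), if_neg (by omega),
          List.getElem?_eq_none (by simp [List.length_set]; omega),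
          List.getElem?_eq_none (by omega)]
    case pos =>
      by_cases hk : k = a.toNat
      · subst hk
        rw [if_neg (by omega), if_neg (by omega), if_pos (by omega),
            List.getElem?_set_ne (by omega), List.getElem?_set_self (by simpa using hlen)]
        congr 1
        omega
      · by_cases hk2 : k = (players - 1 - a).toNat
        · subst hk2
          rw [if_neg (by omega), if_neg (by omega), if_neg (by omega), if_pos (by omega),
              List.getElem?_set_self (by simp [List.length_set]; omega)]
          congr 2
          omega
        · rw [List.getElem?_set_ne (by omega), List.getElem?_set_ne (by omega)]
          by_cases hc1 : a ≤ (k : Int) ∧ (k : Int) < half ∧ k < du.length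
          · rw [if_pos (by omega), if_pos hc1]
          · rw [if_neg (by omega)]
            by_cases hc2 : a ≤ players - 1 - (k : Int) ∧ players - 1 - (k : Int) < half ∧ k < du.length
            · rw [if_pos (by omega), if_neg hc1, if_pos hc2]
            · rw [if_neg (by omega), if_neg hc1, if_neg hc2]

theorem pvBaseGetA (players : Int) (k : Nat) :
    ((PySem.List.pyRange 0 players 1).map (fun _ => (0 : Int)))[k]? =
      if k < players.toNat then some 0 else none := by
  rw [List.getElem?_map, PySem.List.getElem?_pyRange_one]
  by_cases hk : k < players.toNat
  · rw [if_pos (by omega), if_pos hk]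
    rfl
  · rw [if_neg (by omega), if_neg hk]
    rfl

theorem pvMain (players : Int) : get_default_util players = get_default_util_alt players := by
  simp only [get_default_util, get_default_util_alt]
  have hmod : PySem.Int.mod players 2 = players % 2 :=
    PySem.Int.mod_eq_emod_of_pos (by norm_num)
  have hflo : ∀ a : Int, PySem.Int.floordiv a 2 = a / 2 := fun a =>
    PySem.Int.floordiv_eq_ediv_of_pos (by norm_num)
  have hsetlen : ∀ (v : Int → Int) (du : List Int) (i : Int),
      (du.set i.toNat (v i)).length = du.length := fun _ _ _ => List.length_set
  by_cases hneg : players < 0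
  · -- players < 0 : every range is empty / the base arrays are empty, both sides are []
    have hA : ∀ l : List Int,
        (if PySem.Int.mod players 2 = 0 then
          (PySem.List.pyRange (PySem.Int.truncdiv players 2) players 1).foldl
            (fun du i => du.set i.toNat (PySem.Int.truncdiv players 2 - i - 1))
            ((PySem.List.pyRange 0 (PySem.Int.truncdiv players 2) 1).foldl
              (fun du i => du.set i.toNat (PySem.Int.truncdiv players 2 - i)) l)
        else
          (PySem.List.pyRange (PySem.Int.truncdiv (players - 1) 2 + 1) players 1).foldl
            (fun du i => du.set i.toNat (PySem.Int.truncdiv (players - 1) 2 - i))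
            ((PySem.List.pyRange 0 (PySem.Int.truncdiv (players - 1) 2) 1).foldl
              (fun du i => du.set i.toNat (PySem.Int.truncdiv (players - 1) 2 - i)) l)).length
          = l.length := by
      intro l
      split_ifs
      · rw [pvFoldLen _ (hsetlen _), pvFoldLen _ (hsetlen _)]
      · rw [pvFoldLen _ (hsetlen _), pvFoldLen _ (hsetlen _)]
    refine Eq.trans (List.length_eq_zero_iff.mp ?_) (List.length_eq_zero_iff.mp ?_).symm
    · rw [hA]
      simp only [List.length_map, PySem.List.length_pyRange_one]
      omega
    · rw [pvFoldLen _ (fun du i => by rw [List.length_set, List.length_set]),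
          List.length_replicate]
      omega
  · -- 0 ≤ players
    have hpos : 0 ≤ players := by omega
    have hH : 0 ≤ PySem.Int.floordiv players 2 := by rw [hflo]; omega
    have hmir : 2 * PySem.Int.floordiv players 2 ≤ players := by rw [hflo]; omega
    by_cases hpar : PySem.Int.mod players 2 = 0
    · -- even
      have hp2 : players % 2 = 0 := by rw [← hmod]; exact hpar
      have h2 : (2 : Int) ∣ players := by omega
      rw [if_pos hpar, pvTruncdivTwoOfEven players h2]
      refine List.ext_getElem? fun k => ?_
      rw [pvFoldlSetGet (fun i => PySem.Int.floordiv players 2 - i - 1) players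
            (players - PySem.Int.floordiv players 2).toNat
            (PySem.Int.floordiv players 2) hH rfl,
          pvFoldlSetGet (fun i => PySem.Int.floordiv players 2 - i)
            (PySem.Int.floordiv players 2)
            (PySem.Int.floordiv players 2 - 0).toNat 0 le_rfl rfl,
          pvFoldMirrorGet (PySem.Int.floordiv players 2) players hmir
            (PySem.Int.floordiv players 2 - 0).toNat 0 le_rfl rfl,
          pvFoldLen _ (hsetlen _), pvBaseGetA]
      simp only [List.length_map, PySem.List.length_pyRange_one, List.length_replicate,
        List.getElem?_replicate, hflo]
      split_ifs <;> first | rfl | (exfalso; omega) | (congr 1; omega)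
    · -- odd
      have hp2 : players % 2 = 1 := by rw [← hmod]; omega
      have h2 : (2 : Int) ∣ (players - 1) := by omega
      have hH1 : 0 ≤ PySem.Int.floordiv (players - 1) 2 := by rw [hflo]; omega
      rw [if_neg hpar, pvTruncdivTwoOfEven (players - 1) h2]
      refine List.ext_getElem? fun k => ?_
      rw [pvFoldlSetGet (fun i => PySem.Int.floordiv (players - 1) 2 - i) players
            (players - (PySem.Int.floordiv (players - 1) 2 + 1)).toNat
            (PySem.Int.floordiv (players - 1) 2 + 1) (by omega) rfl,
          pvFoldlSetGet (fun i => PySem.Int.floordiv (players - 1) 2 - i)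
            (PySem.Int.floordiv (players - 1) 2)
            (PySem.Int.floordiv (players - 1) 2 - 0).toNat 0 le_rfl rfl,
          pvFoldMirrorGet (PySem.Int.floordiv players 2) players hmir
            (PySem.Int.floordiv players 2 - 0).toNat 0 le_rfl rfl,
          pvFoldLen _ (hsetlen _), pvBaseGetA]
      simp only [List.length_map, PySem.List.length_pyRange_one, List.length_replicate,
        List.getElem?_replicate, hflo]
      split_ifs <;> first | rfl | (exfalso; omega) | (congr 1; omega)

-- ===== VERDICT (by name: the statement is the Claim_ definition above) =====
theorem get_default_util_spec : Claim_equal_get_default_util := by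
  intro players _
  unfold Spec_get_default_util
  exact pvMain players
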